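-- pv_equiv track=rewrite | github.com/andy0130tw/NTU-ComSec2019 | hw11/spn_tutorial.py | group_by_sboxs
-- ===== SOURCE A (Python) =====
-- def group_by_sboxs(fins):
--     ssboxs = {}
--
--     for i in fins:
--         boxid = i // 4
--         mask = 1 << (3 - i % 4)
--         if boxid not in ssboxs:
--             ssboxs[boxid] = 0
--         ssboxs[boxid] |= mask
--
--     return ssboxs
-- ===== SOURCE B (Python) =====
-- def _mask(idxs):
--     m = 0
--     for i in idxs:
--         m |= 1 << (3 - i % 4)
--     return m
--
--
-- def group_by_sboxs(fins):
--     groups = {}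
--     for i in fins:
--         groups.setdefault(i // 4, []).append(i)
--     return {b: _mask(idxs) for b, idxs in groups.items()}
-- ===== Notes on version B (the rewrite author's own statement) =====
-- stated objective: alternative
-- what changed: Splits A's fused membership-test-plus-OR loop into two phases: one pass grouping indices per box with setdefault, then a dict comprehension aggregating each group into a bitmask.
import Mathlib
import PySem

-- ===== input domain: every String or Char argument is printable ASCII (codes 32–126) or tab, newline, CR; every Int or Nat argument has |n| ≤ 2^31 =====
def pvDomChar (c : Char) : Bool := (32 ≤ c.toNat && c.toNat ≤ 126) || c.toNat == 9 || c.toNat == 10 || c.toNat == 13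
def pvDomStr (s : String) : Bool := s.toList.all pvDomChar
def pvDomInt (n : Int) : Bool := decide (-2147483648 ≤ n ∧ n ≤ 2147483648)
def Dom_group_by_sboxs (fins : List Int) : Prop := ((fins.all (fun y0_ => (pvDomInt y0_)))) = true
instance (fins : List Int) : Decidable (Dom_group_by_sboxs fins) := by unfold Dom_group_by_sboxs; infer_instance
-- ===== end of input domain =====

-- B replaces A's fused membership-test-plus-OR loop by a grouping pass (boxid -> its indices) followed by a
-- separate per-group mask aggregation; same cost, different decomposition ('alternative').

-- ===== PORT A =====
-- one iteration of A's for-loop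
def pvStepA (d : PySem.Dict Int Int) (i : Int) : PySem.Dict Int Int :=
  let boxid := PySem.Int.floordiv i 4
  let mask : Int := 1 <<< (3 - PySem.Int.mod i 4).toNat
  let d1 := if d.contains boxid then d else d.insert boxid 0
  d1.insert boxid (PySem.Int.bor (d1.getD boxid 0) mask)   -- ssboxs[boxid] |= mask (key is present, so getD is the plain lookup)

def group_by_sboxs (fins : List Int) : List (Int × Int) :=
  (fins.foldl pvStepA PySem.Dict.empty).items

-- ===== PORT B =====
-- helper _mask of Source B
def pvMask (idxs : List Int) : Int :=
  idxs.foldl (fun m i => PySem.Int.bor m (1 <<< (3 - PySem.Int.mod i 4).toNat)) 0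

-- groups.setdefault(i // 4, []).append(i): in-place append to the (possibly fresh) bucket = modify with default []
def pvStepB (d : PySem.Dict Int (List Int)) (i : Int) : PySem.Dict Int (List Int) :=
  d.modify (PySem.Int.floordiv i 4) [] (fun l => l ++ [i])

-- the dict comprehension iterates groups.items() whose keys are distinct, so its association list is this map
def group_by_sboxs_alt (fins : List Int) : List (Int × Int) :=
  let groups := fins.foldl pvStepB PySem.Dict.empty
  groups.items.map (fun p => (p.1, pvMask p.2))

-- ===== PRECONDITION & SPEC =====
def Spec_group_by_sboxs (fins : List Int) (out : List (Int × Int)) : Prop := out = group_by_sboxs_alt fins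
instance (fins : List Int) (out : List (Int × Int)) : Decidable (Spec_group_by_sboxs fins out) := by unfold Spec_group_by_sboxs; infer_instance

-- ===== CLAIM (what is proved, stated in full; the proofs are below) =====
def Claim_equal_group_by_sboxs : Prop := ∀ (fins : List Int), Dom_group_by_sboxs fins → Spec_group_by_sboxs fins (group_by_sboxs fins)

-- ===== LEMMAS AND PROOFS =====

theorem pvMask_append (l : List Int) (i : Int) :
    pvMask (l ++ [i]) = PySem.Int.bor (pvMask l) (1 <<< (3 - PySem.Int.mod i 4).toNat) := by
  simp [pvMask, List.foldl_append]

theorem pv_keys_eq (dA : PySem.Dict Int Int) (dG : PySem.Dict Int (List Int))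
    (hrel : dA.items = dG.items.map (fun p => (p.1, pvMask p.2))) : dA.keys = dG.keys := by
  simp only [PySem.Dict.keys, hrel, List.map_map]
  rfl

theorem pv_step_rel (dA : PySem.Dict Int Int) (dG : PySem.Dict Int (List Int)) (i : Int)
    (hnd : dG.keys.Nodup)
    (hrel : dA.items = dG.items.map (fun p => (p.1, pvMask p.2))) :
    (pvStepA dA i).items = (pvStepB dG i).items.map (fun p => (p.1, pvMask p.2)) := by
  have hkeys := pv_keys_eq dA dG hrel
  have hndA : dA.keys.Nodup := hkeys ▸ hnd
  have hcont : dA.contains (PySem.Int.floordiv i 4) = dG.contains (PySem.Int.floordiv i 4) := by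
    rw [PySem.Dict.contains_eq_decide_mem_keys, PySem.Dict.contains_eq_decide_mem_keys, hkeys]
  by_cases hc : dG.contains (PySem.Int.floordiv i 4) = true
  · -- key already present: both sides rewrite the existing entry in place
    obtain ⟨p, hpmem, hpfst⟩ : ∃ p ∈ dG.items, p.1 = PySem.Int.floordiv i 4 := by
      have : PySem.Int.floordiv i 4 ∈ dG.keys := (PySem.Dict.contains_iff_mem_keys _ _).1 hc
      simp only [PySem.Dict.keys, List.mem_map] at this
      obtain ⟨p, hp, hfst⟩ := this
      exact ⟨p, hp, hfst⟩
    have hGget : dG.getD (PySem.Int.floordiv i 4) [] = p.2 :=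
      PySem.Dict.getD_of_mem_items dG (by rw [← hpfst]; simpa using hpmem) hnd []
    have hAmem : (PySem.Int.floordiv i 4, pvMask p.2) ∈ dA.items := by
      rw [hrel]
      exact List.mem_map.2 ⟨p, hpmem, by rw [hpfst]⟩
    have hAget : dA.getD (PySem.Int.floordiv i 4) 0 = pvMask p.2 :=
      PySem.Dict.getD_of_mem_items dA hAmem hndA 0
    simp only [pvStepA, pvStepB, PySem.Dict.modify, hcont, hc, if_pos,
      PySem.Dict.items_insert_of_contains _ _ (hcont ▸ hc),
      PySem.Dict.items_insert_of_contains _ _ hc]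
    rw [hrel, List.map_map, List.map_map]
    refine List.map_congr_left (fun q hq => ?_)
    by_cases hqb : q.1 = PySem.Int.floordiv i 4
    · have hb : (q.1 == PySem.Int.floordiv i 4) = true := beq_iff_eq.2 hqb
      simp only [Function.comp_apply, hb, if_true]
      rw [hAget, hGget, pvMask_append]
    · have hb : (q.1 == PySem.Int.floordiv i 4) = false := beq_eq_false_iff_ne.2 hqb
      simp only [Function.comp_apply, hb, Bool.false_eq_true, if_false]
  · -- fresh key: both sides append a new entry
    have hcA : dA.contains (PySem.Int.floordiv i 4) = false := by
      rw [hcont]; exact eq_false_of_ne_true hc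
    have hcG : dG.contains (PySem.Int.floordiv i 4) = false := eq_false_of_ne_true hc
    simp only [pvStepA, pvStepB, PySem.Dict.modify, hcA, Bool.false_eq_true, if_false,
      PySem.Dict.getD_insert_self, PySem.Dict.insert_insert_self,
      PySem.Dict.getD_of_not_contains _ _ hcG,
      PySem.Dict.items_insert_of_not_contains _ _ hcA,
      PySem.Dict.items_insert_of_not_contains _ _ hcG]
    rw [List.map_append, ← hrel]
    simp only [List.nil_append, List.map_cons, List.map_nil, pvMask, List.foldl]

theorem pv_loop_inv (fins : List Int) :
    ∀ (dA : PySem.Dict Int Int) (dG : PySem.Dict Int (List Int)),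
      dG.keys.Nodup →
      dA.items = dG.items.map (fun p => (p.1, pvMask p.2)) →
      (fins.foldl pvStepA dA).items = ((fins.foldl pvStepB dG).items).map (fun p => (p.1, pvMask p.2)) := by
  induction fins with
  | nil => intro dA dG _ hrel; simpa using hrel
  | cons i rest ih =>
    intro dA dG hnd hrel
    simp only [List.foldl_cons]
    exact ih _ _ (by simpa [pvStepB, PySem.Dict.modify] using PySem.Dict.nodup_keys_insert _ _ _ hnd)
      (pv_step_rel dA dG i hnd hrel)

-- ===== VERDICT (by name: the statement is the Claim_ definition above) =====
theorem group_by_sboxs_spec : Claim_equal_group_by_sboxs := by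
  intro fins _
  show group_by_sboxs fins = group_by_sboxs_alt fins
  unfold group_by_sboxs group_by_sboxs_alt
  exact pv_loop_inv fins PySem.Dict.empty PySem.Dict.empty (by simp [PySem.Dict.empty, PySem.Dict.keys]) (by rfl)
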